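-- pv_equiv track=rewrite | github.com/Mohammad-Adilkhan3/leetcode | movePiecesToObtainAString.py | canTransform
-- ===== SOURCE A (Python) =====
-- def canTransform(start: str, target: str) -> bool:
--     n = len(start)
--
--     # Remove blanks and compare character sequences
--     start_pieces = [(c, i) for i, c in enumerate(start) if c != '_']
--     target_pieces = [(c, i) for i, c in enumerate(target) if c != '_']
--
--     if len(start_pieces) != len(target_pieces):
--         return False  # Mismatch in number of pieces
--
--     for (sc, si), (tc, ti) in zip(start_pieces, target_pieces):
--         if sc != tc:  # Pieces don't match
--             return False
--         if sc == 'L' and si < ti:  # 'L' moved right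
--             return False
--         if sc == 'R' and si > ti:  # 'R' moved left
--             return False
--
--     return True
-- ===== SOURCE B (Python) =====
-- def canTransform(start: str, target: str) -> bool:
--     # Counting approach: the stripped (blank-free) sequences must be identical, and
--     # in every aligned prefix target must have seen at least as many 'L' as start
--     # (L pieces only move left) and start at least as many 'R' as target.
--     if [c for c in start if c != '_'] != [c for c in target if c != '_']:
--         return False
--     dL = dR = 0  # dL = #L(target prefix) - #L(start prefix); dR = #R(start prefix) - #R(target prefix)
--     for k in range(max(len(start), len(target))):
--         a = start[k] if k < len(start) else '_'
--         b = target[k] if k < len(target) else '_'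
--         if b == 'L':
--             dL += 1
--         elif b == 'R':
--             dR -= 1
--         if a == 'L':
--             dL -= 1
--         elif a == 'R':
--             dR += 1
--         if dL < 0 or dR < 0:
--             return False
--     return True
-- ===== Notes on version B (the rewrite author's own statement) =====
-- stated objective: alternative
-- what changed: Replaced A's piece-index pairing (build two (char,index) lists, length check, zip with per-piece index comparisons) by a counting argument: compare the blank-stripped strings and then sweep both strings once keeping only two running counters (surplus of L seen in target, surplus of R seen in start), which must never go negative; no indices are ever paired or compared.
import Mathlib
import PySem

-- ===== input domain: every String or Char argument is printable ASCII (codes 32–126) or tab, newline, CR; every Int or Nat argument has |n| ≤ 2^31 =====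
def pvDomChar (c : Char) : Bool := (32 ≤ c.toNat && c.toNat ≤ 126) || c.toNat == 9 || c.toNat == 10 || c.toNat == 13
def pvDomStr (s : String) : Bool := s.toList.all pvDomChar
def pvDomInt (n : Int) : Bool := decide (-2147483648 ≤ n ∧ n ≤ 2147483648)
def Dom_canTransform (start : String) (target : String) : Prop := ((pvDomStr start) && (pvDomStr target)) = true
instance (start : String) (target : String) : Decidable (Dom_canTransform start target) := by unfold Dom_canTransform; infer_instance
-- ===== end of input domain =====

-- B replaces A's piece-index pairing (two (char,index) lists, length check, zip of
-- per-piece index comparisons) by a counting argument: stripped strings equal plus one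
-- sweep with two running surplus counters that must stay nonnegative; same return value.

-- ===== PORT A =====
-- the for-loop over zip(start_pieces, target_pieces) with its early returns
def pvLoopA : List ((Char × Int) × (Char × Int)) → Bool
  | [] => true
  | ((sc, si), (tc, ti)) :: rest =>
    if sc ≠ tc then false
    else if sc = 'L' ∧ si < ti then false
    else if sc = 'R' ∧ si > ti then false
    else pvLoopA rest

-- [(c, i) for i, c in enumerate(l) if c != '_'], indices starting at k
def pvPieces (l : List Char) (k : Int) : List (Char × Int) :=
  ((PySem.List.enumerate l k).filter (fun p => p.2 ≠ '_')).map (fun p => (p.2, p.1))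

def canTransform (start : String) (target : String) : Bool :=
  let start_pieces := pvPieces start.toList 0
  let target_pieces := pvPieces target.toList 0
  if start_pieces.length ≠ target_pieces.length then false
  else pvLoopA (start_pieces.zip target_pieces)

-- ===== PORT B =====
-- [c for c in s if c != '_']
def pvStripB (l : List Char) : List Char := l.filter (fun c => c ≠ '_')

-- the 'for k in range(max(n, m))' sweep of Source B: one step reads the current character of
-- each string ('_' once past its end), updates the two surplus counters with Source B's
-- if/elif chains, and fails as soon as a counter is negative
def pvLoopB (s t : List Char) (dL0 dR0 : Int) : Bool :=
  if s.isEmpty && t.isEmpty then true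
  else
    let a := s.headD '_'
    let b := t.headD '_'
    let p1 : Int × Int :=
      if b = 'L' then (dL0 + 1, dR0) else if b = 'R' then (dL0, dR0 - 1) else (dL0, dR0)
    let p2 : Int × Int :=
      if a = 'L' then (p1.1 - 1, p1.2) else if a = 'R' then (p1.1, p1.2 + 1) else p1
    if p2.1 < 0 || p2.2 < 0 then false else pvLoopB s.tail t.tail p2.1 p2.2
termination_by s.length + t.length
decreasing_by cases s <;> cases t <;> simp_all <;> omega

def canTransform_alt (start : String) (target : String) : Bool :=
  if pvStripB start.toList ≠ pvStripB target.toList then false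
  else pvLoopB start.toList target.toList 0 0

-- ===== PRECONDITION & SPEC =====
def Spec_canTransform (start : String) (target : String) (out : Bool) : Prop := out = canTransform_alt start target
instance (start : String) (target : String) (out : Bool) : Decidable (Spec_canTransform start target out) := by unfold Spec_canTransform; infer_instance

-- ===== CLAIM (what is proved, stated in full; the proofs are below) =====
def Claim_equal_canTransform : Prop := ∀ (start : String) (target : String), Dom_canTransform start target → Spec_canTransform start target (canTransform start target)

-- ===== LEMMAS AND PROOFS =====

-- number of occurrences of c in l
def pvCnt (c : Char) (l : List Char) : Nat := (l.filter (fun x => x = c)).length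

-- positions (as Int) of the pieces of S carrying character c
def pvSel (c : Char) (S : List (Char × Int)) : List Int :=
  (S.filter (fun p => p.1 = c)).map (fun p => p.2)

-- the piecewise comparison as a single recursion (reference point for A's side)
def pvMP : List (Char × Int) → List (Char × Int) → Bool
  | [], [] => true
  | [], _ :: _ => false
  | _ :: _, [] => false
  | (sc, si) :: a, (tc, ti) :: b =>
    if sc ≠ tc then false
    else if sc = 'L' ∧ si < ti then false
    else if sc = 'R' ∧ si > ti then false
    else pvMP a b

-- the per-piece relation A checks
def pvPhi (p q : Char × Int) : Prop :=
  p.1 = q.1 ∧ (p.1 = 'L' → q.2 ≤ p.2) ∧ (p.1 = 'R' → p.2 ≤ q.2)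

theorem pvCnt_cons (c x : Char) (l : List Char) :
    pvCnt c (x :: l) = (if x = c then 1 else 0) + pvCnt c l := by
  by_cases h : x = c <;> simp [pvCnt, h] <;> omega

theorem pvPieces_nil (k : Int) : pvPieces [] k = [] := by
  simp [pvPieces, PySem.List.enumerate_nil]

theorem pvPieces_cons (c : Char) (l : List Char) (k : Int) :
    pvPieces (c :: l) k =
      if c = '_' then pvPieces l (k + 1) else (c, k) :: pvPieces l (k + 1) := by
  by_cases h : c = '_' <;> simp [pvPieces, PySem.List.enumerate_cons, h]

-- A's length-check + zip loop equals the piecewise comparison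
theorem pvA_eq_mp (a b : List (Char × Int)) :
    (if a.length ≠ b.length then false else pvLoopA (a.zip b)) = pvMP a b := by
  induction a generalizing b with
  | nil => cases b <;> simp [pvLoopA, pvMP]
  | cons p a ih =>
    cases b with
    | nil => simp [pvMP]
    | cons q b =>
      obtain ⟨sc, si⟩ := p
      obtain ⟨tc, ti⟩ := q
      simp only [List.zip_cons_cons, List.length_cons, pvLoopA, pvMP]
      rw [← ih b]
      by_cases hl : a.length = b.length <;> simp [hl]

theorem pvMP_iff (S T : List (Char × Int)) :
    pvMP S T = true ↔ List.Forall₂ pvPhi S T := by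
  induction S generalizing T with
  | nil => cases T <;> simp [pvMP]
  | cons p S ih =>
    cases T with
    | nil => simp [pvMP]
    | cons q T =>
      obtain ⟨sc, si⟩ := p
      obtain ⟨tc, ti⟩ := q
      simp only [pvMP, List.forall₂_cons, ih, pvPhi]
      split_ifs with h1 h2 h3 <;> simp_all <;> omega

theorem forall2_map_fst (S T : List (Char × Int)) (h : List.Forall₂ pvPhi S T) :
    S.map (fun p => p.1) = T.map (fun p => p.1) := by
  induction h with
  | nil => rfl
  | cons hpq _ ih => simp [ih, hpq.1]

theorem pvSel_cons (c d : Char) (x : Int) (S : List (Char × Int)) :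
    pvSel c ((d, x) :: S) = if d = c then x :: pvSel c S else pvSel c S := by
  by_cases h : d = c <;> simp [pvSel, List.filter_cons, h]

theorem phi_split (S T : List (Char × Int))
    (hmap : S.map (fun p => p.1) = T.map (fun p => p.1)) :
    List.Forall₂ pvPhi S T ↔
      List.Forall₂ (fun (x y : Int) => y ≤ x) (pvSel 'L' S) (pvSel 'L' T) ∧
      List.Forall₂ (fun (x y : Int) => x ≤ y) (pvSel 'R' S) (pvSel 'R' T) := by
  induction S generalizing T with
  | nil =>
    cases T with
    | nil => simp [pvSel]
    | cons q T => simp at hmap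
  | cons p S ih =>
    cases T with
    | nil => simp at hmap
    | cons q T =>
      obtain ⟨sc, si⟩ := p
      obtain ⟨tc, ti⟩ := q
      simp only [List.map_cons, List.cons.injEq] at hmap
      obtain ⟨hc, hmap'⟩ := hmap
      subst hc
      simp only [pvSel_cons, List.forall₂_cons, pvPhi]
      rw [ih T hmap']
      by_cases hL : sc = 'L'
      · subst hL
        have h1 : ¬('L' = 'R') := by decide
        simp [h1, List.forall₂_cons]
        tauto
      · by_cases hR : sc = 'R'
        · subst hR
          simp [hL, List.forall₂_cons]
          tauto
        · simp [hL, hR]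

theorem pieces_pos_ge (s : List Char) (i : Int) :
    ∀ p ∈ pvPieces s i, i ≤ p.2 := by
  induction s generalizing i with
  | nil => simp [pvPieces_nil]
  | cons c s ih =>
    intro p hp
    rw [pvPieces_cons] at hp
    by_cases h : c = '_'
    · simp only [h, if_pos rfl] at hp
      have := ih (i + 1) p hp; omega
    · simp only [h, if_neg, List.mem_cons, ite_false] at hp
      rcases hp with rfl | hp
      · simp
      · have := ih (i + 1) p hp; omega

theorem pieces_sorted (s : List Char) (i : Int) :
    (pvPieces s i).Pairwise (fun p q => p.2 < q.2) := by
  induction s generalizing i with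
  | nil => simp [pvPieces_nil]
  | cons c s ih =>
    rw [pvPieces_cons]
    split
    · exact ih (i + 1)
    · exact List.Pairwise.cons (fun q hq => by have := pieces_pos_ge s (i + 1) q hq; omega) (ih (i + 1))

theorem sel_sorted (c : Char) (s : List Char) (i : Int) :
    (pvSel c (pvPieces s i)).Pairwise (· < ·) := by
  unfold pvSel
  rw [List.pairwise_map]
  exact List.Pairwise.filter _ (pieces_sorted s i)

theorem sel_pos_ge (c : Char) (s : List Char) (i : Int) :
    ∀ x ∈ pvSel c (pvPieces s i), i ≤ x := by
  intro x hx
  unfold pvSel at hx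
  obtain ⟨p, hp, rfl⟩ := List.mem_map.mp hx
  exact pieces_pos_ge s i p (List.mem_filter.mp hp).1

theorem sel_length_map (c : Char) (S : List (Char × Int)) :
    (pvSel c S).length = ((S.map (fun p => p.1)).filter (fun x => x = c)).length := by
  induction S with
  | nil => rfl
  | cons p S ih =>
    by_cases h : p.1 = c <;> simp [pvSel, List.filter_cons, h] <;>
      simpa [pvSel] using ih

theorem pieces_map_fst (s : List Char) (i : Int) :
    (pvPieces s i).map (fun p => p.1) = s.filter (fun c => c ≠ '_') := by
  induction s generalizing i with
  | nil => simp [pvPieces_nil]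
  | cons c s ih =>
    rw [pvPieces_cons, List.filter_cons]
    by_cases h : c = '_' <;> simp [h, ih]

-- pointwise domination of sorted position lists ⟺ prefix-count domination
theorem pos_dom (p q : List Int) (hp : p.Pairwise (· < ·)) (hq : q.Pairwise (· < ·))
    (hlen : p.length = q.length) :
    List.Forall₂ (fun x y => y ≤ x) p q ↔
      ∀ j : Int, ((p.filter (fun x => x < j)).length ≤ (q.filter (fun x => x < j)).length) := by
  induction p generalizing q with
  | nil =>
    cases q with
    | nil => simp
    | cons y q' => simp at hlen
  | cons x p' ih =>
    cases q with
    | nil => simp at hlen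
    | cons y q' =>
      have hpx : ∀ a ∈ p', x < a := (List.pairwise_cons.mp hp).1
      have hqy : ∀ a ∈ q', y < a := (List.pairwise_cons.mp hq).1
      have hp' := List.Pairwise.of_cons hp
      have hq' := List.Pairwise.of_cons hq
      have hlen' : p'.length = q'.length := by simpa using hlen
      constructor
      · intro h j
        rcases List.forall₂_cons.mp h with ⟨hyx, htail⟩
        have hIH := (ih q' hp' hq' hlen').mp htail j
        simp only [List.filter_cons]
        by_cases hxj : x < j
        · have hyj : y < j := by omega
          simp [hxj, hyj]
          omega
        · by_cases hyj : y < j <;> simp [hxj, hyj] <;> omega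
      · intro h
        have hyx : y ≤ x := by
          by_contra hcon
          push_neg at hcon
          have h1 := h (x + 1)
          have h2 : (List.filter (fun a => decide (a < x + 1)) (y :: q')) = [] := by
            rw [List.filter_eq_nil_iff]
            intro a ha
            rcases List.mem_cons.mp ha with rfl | ha
            · simp
              omega
            · have := hqy a ha
              simp
              omega
          simp only [h2] at h1
          have hx1 : x < x + 1 := by omega
          simp [List.filter_cons, hx1] at h1
        have htail : ∀ j : Int,
            ((p'.filter (fun a => a < j)).length ≤ (q'.filter (fun a => a < j)).length) := by
          intro j
          by_cases hxj : x < j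
          · have hyj : y < j := by omega
            have hj := h j
            simp [List.filter_cons, hxj, hyj] at hj
            omega
          · have h2 : (List.filter (fun a => decide (a < j)) p') = [] := by
              rw [List.filter_eq_nil_iff]
              intro a ha
              have := hpx a ha
              simp
              omega
            simp only [h2]
            simp
        exact List.Forall₂.cons hyx ((ih q' hp' hq' hlen').mpr htail)

-- prefix counts of positions = character counts on prefixes
theorem sel_count (c : Char) (hc : c ≠ '_') (s : List Char) (i : Int) (j : Nat) :
    (((pvSel c (pvPieces s i)).filter (fun x => x < i + (j : Int))).length) =
      pvCnt c (s.take j) := by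
  induction s generalizing i j with
  | nil => simp [pvPieces_nil, pvSel, pvCnt]
  | cons x s ih =>
    cases j with
    | zero =>
      simp [pvCnt]
      exact sel_pos_ge c (x :: s) i
    | succ k =>
      have hcast : i + ((k + 1 : Nat) : Int) = (i + 1) + (k : Int) := by push_cast; ring
      rw [pvPieces_cons, List.take_succ_cons, pvCnt_cons]
      by_cases hu : x = '_'
      · have hxc : ¬(x = c) := by rw [hu]; exact fun h => hc h.symm
        rw [if_pos hu, if_neg hxc, hcast]
        simpa using ih (i + 1) k
      · rw [if_neg hu, pvSel_cons]
        by_cases hxc : x = c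
        · have hik : i < i + ((k + 1 : Nat) : Int) := by push_cast; omega
          rw [if_pos hxc, if_pos hxc]
          simp only [List.filter_cons, decide_eq_true_eq, if_pos hik]
          rw [List.length_cons, hcast]
          rw [ih (i + 1) k]
          omega
        · rw [if_neg hxc, if_neg hxc, hcast]
          simpa using ih (i + 1) k

-- B's sweep ⟺ the prefix-count conditions
theorem cnt_take_succ (c : Char) (hc : c ≠ '_') (s : List Char) (j : Nat) :
    pvCnt c (s.take (j + 1)) = (if s.headD '_' = c then 1 else 0) + pvCnt c (s.tail.take j) := by
  cases s with
  | nil =>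
    have h : ¬('_' = c) := fun h => hc h.symm
    simp [pvCnt, h]
  | cons x s => simp [List.take_succ_cons, pvCnt_cons]


theorem step_core (s t : List Char) (dL dR eL eR : Int) (hL : 0 ≤ dL) (hR : 0 ≤ dR)
    (heL : eL = dL + (if t.headD '_' = 'L' then 1 else 0) - (if s.headD '_' = 'L' then 1 else 0))
    (heR : eR = dR - (if t.headD '_' = 'R' then 1 else 0) + (if s.headD '_' = 'R' then 1 else 0))
    (hrecur : 0 ≤ eL → 0 ≤ eR →
      (pvLoopB s.tail t.tail eL eR = true ↔
        ∀ j : Nat, 0 ≤ eL + (pvCnt 'L' (t.tail.take j) : Int) - (pvCnt 'L' (s.tail.take j) : Int) ∧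
                   0 ≤ eR + (pvCnt 'R' (s.tail.take j) : Int) - (pvCnt 'R' (t.tail.take j) : Int))) :
    ((if eL < 0 || eR < 0 then false else pvLoopB s.tail t.tail eL eR) = true ↔
      ∀ j : Nat, 0 ≤ dL + (pvCnt 'L' (t.take j) : Int) - (pvCnt 'L' (s.take j) : Int) ∧
                 0 ≤ dR + (pvCnt 'R' (s.take j) : Int) - (pvCnt 'R' (t.take j) : Int)) := by
  have hLc : ('L' : Char) ≠ '_' := by decide
  have hRc : ('R' : Char) ≠ '_' := by decide
  have e1 : ∀ (c : Char), c ≠ '_' → ∀ (u : List Char),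
      pvCnt c (u.take 1) = (if u.headD '_' = c then 1 else 0) := by
    intro c hc u
    have h := cnt_take_succ c hc u 0
    simpa [pvCnt] using h
  by_cases hg : eL < 0 ∨ eR < 0
  · have hg' : (eL < 0 || eR < 0) = true := by
      rcases hg with h | h <;> simp [h]
    rw [if_pos hg']
    simp only [Bool.false_eq_true, false_iff, not_forall]
    refine ⟨1, fun h1 => ?_⟩
    rw [e1 'L' hLc s, e1 'L' hLc t, e1 'R' hRc s, e1 'R' hRc t] at h1
    rcases hg with hg | hg <;> split_ifs at h1 heL heR <;> omega
  · push_neg at hg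
    rw [if_neg (by simp only [Bool.or_eq_true, decide_eq_true_eq]; omega :
      ¬(decide (eL < 0) || decide (eR < 0)) = true)]
    rw [hrecur hg.1 hg.2]
    constructor
    · intro h j
      cases j with
      | zero =>
        simp [pvCnt]
        omega
      | succ k =>
        have hk := h k
        rw [cnt_take_succ 'L' hLc s k, cnt_take_succ 'L' hLc t k,
            cnt_take_succ 'R' hRc s k, cnt_take_succ 'R' hRc t k]
        split_ifs at heL heR ⊢ <;> omega
    · intro h k
      have hk := h (k + 1)
      rw [cnt_take_succ 'L' hLc s k, cnt_take_succ 'L' hLc t k,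
          cnt_take_succ 'R' hRc s k, cnt_take_succ 'R' hRc t k] at hk
      split_ifs at hk heL heR <;> omega

theorem pvLoopB_iff (s t : List Char) (dL dR : Int) (hL : 0 ≤ dL) (hR : 0 ≤ dR) :
    pvLoopB s t dL dR = true ↔
      ∀ j : Nat, 0 ≤ dL + (pvCnt 'L' (t.take j) : Int) - (pvCnt 'L' (s.take j) : Int) ∧
                 0 ≤ dR + (pvCnt 'R' (s.take j) : Int) - (pvCnt 'R' (t.take j) : Int) := by
  have H : ∀ (n : Nat) (s t : List Char) (dL dR : Int), s.length + t.length = n →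
      0 ≤ dL → 0 ≤ dR →
      (pvLoopB s t dL dR = true ↔
        ∀ j : Nat, 0 ≤ dL + (pvCnt 'L' (t.take j) : Int) - (pvCnt 'L' (s.take j) : Int) ∧
                   0 ≤ dR + (pvCnt 'R' (s.take j) : Int) - (pvCnt 'R' (t.take j) : Int)) := by
    intro n
    induction n using Nat.strong_induction_on with
    | _ n ih =>
      intro s t dL dR hn hL hR
      rw [pvLoopB]
      by_cases hst : (s.isEmpty && t.isEmpty) = true
      · rw [if_pos hst]
        obtain ⟨hs, ht⟩ := by simpa [List.isEmpty_iff] using hst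
        subst hs; subst ht
        simp [pvCnt]
        omega
      · rw [if_neg hst]
        have hlt : s.tail.length + t.tail.length < n := by
          cases s <;> cases t <;> simp_all <;> omega
        refine step_core s t dL dR _ _ hL hR ?_ ?_ ?_
        · clear ih hn
          split_ifs <;> simp_all
        · clear ih hn
          split_ifs <;> simp_all
        · intro h1 h2
          exact ih _ hlt s.tail t.tail _ _ rfl h1 h2
  exact H (s.length + t.length) s t dL dR rfl hL hR


theorem forall2_swap {a : Type} {R : a → a → Prop} {l1 l2 : List a}
    (h : List.Forall₂ R l1 l2) : List.Forall₂ (fun x y => R y x) l2 l1 := by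
  induction h with
  | nil => constructor
  | cons h _ ih => exact List.Forall₂.cons h ih

theorem filter_lt_nonpos (c : Char) (s : List Char) (j : Int) (hj : j ≤ 0) :
    (pvSel c (pvPieces s 0)).filter (fun x => x < j) = [] := by
  rw [List.filter_eq_nil_iff]
  intro a ha
  have := sel_pos_ge c s 0 a ha
  simp
  omega

theorem count_cond_iff (c : Char) (hc : c ≠ '_') (s t : List Char)
    (hlen : (pvSel c (pvPieces s 0)).length = (pvSel c (pvPieces t 0)).length) :
    (∀ j : Int, ((pvSel c (pvPieces s 0)).filter (fun x => x < j)).length ≤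
                ((pvSel c (pvPieces t 0)).filter (fun x => x < j)).length) ↔
      ∀ j : Nat, (pvCnt c (s.take j) : Int) ≤ (pvCnt c (t.take j) : Int) := by
  constructor
  · intro h j
    have hj := h ((j : Int))
    have h1 := sel_count c hc s 0 j
    have h2 := sel_count c hc t 0 j
    simp only [zero_add] at h1 h2
    rw [h1, h2] at hj
    exact_mod_cast hj
  · intro h j
    by_cases hj : j ≤ 0
    · rw [filter_lt_nonpos c s j hj, filter_lt_nonpos c t j hj]
    · push_neg at hj
      have hjn : j = (0 : Int) + (j.toNat : Int) := by omega
      rw [hjn, sel_count c hc s 0 j.toNat, sel_count c hc t 0 j.toNat]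
      exact_mod_cast h j.toNat

-- the heart of the equivalence: A's per-piece index conditions ⟺ B's stripped equality
-- plus prefix-count domination
theorem mp_iff_count (s t : List Char) :
    List.Forall₂ pvPhi (pvPieces s 0) (pvPieces t 0) ↔
      (pvStripB s = pvStripB t ∧ pvLoopB s t 0 0 = true) := by
  have hLc : ('L' : Char) ≠ '_' := by decide
  have hRc : ('R' : Char) ≠ '_' := by decide
  rw [pvLoopB_iff s t 0 0 le_rfl le_rfl]
  constructor
  · intro h
    have hmap := forall2_map_fst _ _ h
    have hstrip : pvStripB s = pvStripB t := by
      have h1 := pieces_map_fst s 0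
      have h2 := pieces_map_fst t 0
      unfold pvStripB
      rw [← h1, ← h2, hmap]
    refine ⟨hstrip, ?_⟩
    obtain ⟨hFL, hFR⟩ := (phi_split _ _ hmap).mp h
    have hlenL : (pvSel 'L' (pvPieces s 0)).length = (pvSel 'L' (pvPieces t 0)).length := by
      rw [sel_length_map, sel_length_map, hmap]
    have hlenR : (pvSel 'R' (pvPieces s 0)).length = (pvSel 'R' (pvPieces t 0)).length := by
      rw [sel_length_map, sel_length_map, hmap]
    have hcL := (count_cond_iff 'L' hLc s t hlenL).mp
      ((pos_dom _ _ (sel_sorted 'L' s 0) (sel_sorted 'L' t 0) hlenL).mp hFL)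
    have hcR := (count_cond_iff 'R' hRc t s hlenR.symm).mp
      ((pos_dom _ _ (sel_sorted 'R' t 0) (sel_sorted 'R' s 0) hlenR.symm).mp (forall2_swap hFR))
    intro j
    have := hcL j
    have := hcR j
    omega
  · rintro ⟨hstrip, hcond⟩
    have hmap : (pvPieces s 0).map (fun p => p.1) = (pvPieces t 0).map (fun p => p.1) := by
      rw [pieces_map_fst, pieces_map_fst]
      exact hstrip
    have hlenL : (pvSel 'L' (pvPieces s 0)).length = (pvSel 'L' (pvPieces t 0)).length := by
      rw [sel_length_map, sel_length_map, hmap]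
    have hlenR : (pvSel 'R' (pvPieces s 0)).length = (pvSel 'R' (pvPieces t 0)).length := by
      rw [sel_length_map, sel_length_map, hmap]
    have hcL : ∀ j : Nat, (pvCnt 'L' (s.take j) : Int) ≤ (pvCnt 'L' (t.take j) : Int) := by
      intro j
      have := hcond j
      omega
    have hcR : ∀ j : Nat, (pvCnt 'R' (t.take j) : Int) ≤ (pvCnt 'R' (s.take j) : Int) := by
      intro j
      have := hcond j
      omega
    have hFL := (pos_dom _ _ (sel_sorted 'L' s 0) (sel_sorted 'L' t 0) hlenL).mpr
      ((count_cond_iff 'L' hLc s t hlenL).mpr hcL)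
    have hFR' := (pos_dom _ _ (sel_sorted 'R' t 0) (sel_sorted 'R' s 0) hlenR.symm).mpr
      ((count_cond_iff 'R' hRc t s hlenR.symm).mpr hcR)
    exact (phi_split _ _ hmap).mpr ⟨hFL, forall2_swap hFR'⟩

-- ===== VERDICT (by name: the statement is the Claim_ definition above) =====
theorem canTransform_spec : Claim_equal_canTransform := by
  intro start target _
  unfold Spec_canTransform canTransform canTransform_alt
  rw [pvA_eq_mp]
  rw [Bool.eq_iff_iff]
  rw [pvMP_iff, mp_iff_count]
  by_cases hstrip : pvStripB start.toList = pvStripB target.toList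
  · simp [hstrip]
  · simp [hstrip]
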